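-- pv_equiv track=rewrite | github.com/databricks-solutions/lakeflow_framework | src/dataflow/cdc_snapshot.py | _get_dynamic_path_index
-- ===== SOURCE A (Python) =====
-- def _get_dynamic_path_index(path: str) -> int:
--     """Return index of first path segment that contains version or fragment (curly or regex)."""
--     path_parts = path.split('/')
--     for idx, part in enumerate(path_parts):
--         if '{version}' in part or '{fragment}' in part:
--             return idx
--         if '(?P<version_' in part or '(?P<fragment>' in part:
--             return idx
--     raise ValueError(f"No version or fragment placeholder found in path: {path}")
-- ===== SOURCE B (Python) =====
-- _MARKERS = ('{version}', '{fragment}', '(?P<version_', '(?P<fragment>')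
--
--
-- def _get_dynamic_path_index(path: str) -> int:
--     """Return index of first path segment that contains version or fragment (curly or regex)."""
--     positions = [p for p in (path.find(m) for m in _MARKERS) if p != -1]
--     if not positions:
--         raise ValueError(f"No version or fragment placeholder found in path: {path}")
--     return path[:min(positions)].count('/')
-- ===== Notes on version B (the rewrite author's own statement) =====
-- stated objective: alternative
-- what changed: Instead of splitting the path into slash-separated segments and scanning them for the four markers, B finds the earliest occurrence position of any marker in the whole string (min over str.find results) and converts it to a segment index by counting slashes before that position; no marker contains a slash, so this yields the same segment index.
import Mathlib
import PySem

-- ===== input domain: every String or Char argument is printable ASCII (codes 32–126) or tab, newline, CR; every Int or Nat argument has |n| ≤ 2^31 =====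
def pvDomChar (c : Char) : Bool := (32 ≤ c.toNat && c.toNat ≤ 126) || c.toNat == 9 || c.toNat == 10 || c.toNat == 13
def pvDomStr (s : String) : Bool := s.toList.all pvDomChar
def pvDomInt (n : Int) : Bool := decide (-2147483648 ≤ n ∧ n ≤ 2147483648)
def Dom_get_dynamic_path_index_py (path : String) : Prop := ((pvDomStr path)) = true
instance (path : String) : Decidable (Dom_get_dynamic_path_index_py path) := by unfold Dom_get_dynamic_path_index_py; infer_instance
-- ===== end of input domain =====

-- B finds the earliest occurrence position of any of the four markers in the whole path (min over
-- str.find results) and counts '/' before it, instead of splitting on '/' and scanning segments;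
-- same segment index since no marker contains '/'.  Both programs raise ValueError when no marker
-- occurs in the path (those inputs are excluded by Pre_).

-- the four placeholder markers
def pvM1 : List Char := "{version}".toList
def pvM2 : List Char := "{fragment}".toList
def pvM3 : List Char := "(?P<version_".toList
def pvM4 : List Char := "(?P<fragment>".toList

-- ===== PORT A =====
-- the 'for idx, part in enumerate(path.split('/'))' loop, with its two if-statements in order
def pvGoA : List (List Char) → Nat → Option Nat
  | [], _ => none
  | part :: rest, idx =>
    if PySem.Chars.isIn pvM1 part || PySem.Chars.isIn pvM2 part then some idx
    else if PySem.Chars.isIn pvM3 part || PySem.Chars.isIn pvM4 part then some idx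
    else pvGoA rest (idx + 1)

def get_dynamic_path_index_py (path : String) : Int :=
  match pvGoA (PySem.Chars.splitOn path.toList ['/']) 0 with
  | some idx => (idx : Int)
  | none => 0   -- Python raises ValueError here; excluded by Pre_

-- ===== PORT B =====
def get_dynamic_path_index_py_alt (path : String) : Int :=
  let cs := path.toList
  let positions := ([pvM1, pvM2, pvM3, pvM4].map (fun m => PySem.Chars.find cs m)).filter (fun p => p ≠ -1)
  match PySem.List.min? positions id with
  | some p => ((PySem.Chars.count (PySem.Chars.slice cs none (some p)) ['/'] : Nat) : Int)
  | none => 0   -- Python raises ValueError here; excluded by Pre_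

-- ===== PRECONDITION & SPEC =====
-- Pre_: some placeholder marker occurs in the path; on all other inputs A raises ValueError.
def Pre_get_dynamic_path_index_py (path : String) : Prop :=
  (PySem.Str.isIn "{version}" path || PySem.Str.isIn "{fragment}" path ||
   PySem.Str.isIn "(?P<version_" path || PySem.Str.isIn "(?P<fragment>" path) = true
instance (path : String) : Decidable (Pre_get_dynamic_path_index_py path) := by
  unfold Pre_get_dynamic_path_index_py; infer_instance

def pvWitness_get_dynamic_path_index_py : String := "tables/{version}/data"

def Spec_get_dynamic_path_index_py (path : String) (out : Int) : Prop := out = get_dynamic_path_index_py_alt path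
instance (path : String) (out : Int) : Decidable (Spec_get_dynamic_path_index_py path out) := by unfold Spec_get_dynamic_path_index_py; infer_instance

-- ===== CLAIM (what is proved, stated in full; the proofs are below) =====
def Claim_equal_get_dynamic_path_index_py : Prop := ∀ (path : String), Dom_get_dynamic_path_index_py path → Pre_get_dynamic_path_index_py path → Spec_get_dynamic_path_index_py path (get_dynamic_path_index_py path)

-- ===== LEMMAS AND PROOFS =====

-- the four markers, as a predicate
def pvIsMarker (m : List Char) : Prop := m = pvM1 ∨ m = pvM2 ∨ m = pvM3 ∨ m = pvM4

lemma pvMarker_ne_nil {m : List Char} (h : pvIsMarker m) : m ≠ [] := by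
  rcases h with h | h | h | h <;> subst h <;> decide

lemma pvMarker_no_slash {m : List Char} (h : pvIsMarker m) : '/' ∉ m := by
  rcases h with h | h | h | h <;> subst h <;> decide

-- reference splitter for sep = '/': pvSplit pre l = the '/'-segments of pre ++ l (pre the current
-- partial segment, guaranteed '/'-free by the caller)
def pvSplit (pre : List Char) : List Char → List (List Char)
  | [] => [pre]
  | x :: t => if x = '/' then pre :: pvSplit [] t else pvSplit (pre ++ [x]) t

lemma pvGo_eq (fuel : Nat) :
    ∀ (l cur : List Char) (acc : List (List Char)), l.length < fuel →
      PySem.Chars.splitOn.go ['/'] fuel l cur acc = acc.reverse ++ pvSplit cur.reverse l := by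
  induction fuel with
  | zero => intro l cur acc h; omega
  | succ fuel ih =>
    intro l cur acc h
    cases l with
    | nil => simp [PySem.Chars.splitOn.go, pvSplit]
    | cons x t =>
      by_cases hx : x = '/'
      · subst hx
        simp only [PySem.Chars.splitOn.go, pvSplit, List.isPrefixOf, if_pos]
        rw [ih]
        · simp
        · simpa using Nat.lt_of_succ_lt_succ h
      · simp only [PySem.Chars.splitOn.go, pvSplit]
        rw [if_neg, ih, if_neg hx]
        · simp
        · simpa using Nat.lt_of_succ_lt_succ h
        · simp [List.isPrefixOf]; intro hh; exact hx hh.symm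

lemma pvSplitOn_eq (cs : List Char) :
    PySem.Chars.splitOn cs ['/'] = pvSplit [] cs := by
  have := pvGo_eq (cs.length + 1) cs [] [] (by omega)
  simpa [PySem.Chars.splitOn] using this

lemma pvCount_go_single (fuel : Nat) :
    ∀ (l : List Char) (acc : Nat), l.length ≤ fuel →
      PySem.Chars.count.go ['/'] fuel l acc = acc + l.count '/' := by
  induction fuel with
  | zero =>
    intro l acc h
    have : l = [] := List.eq_nil_of_length_eq_zero (by omega)
    subst this; simp [PySem.Chars.count.go]
  | succ fuel ih =>
    intro l acc h
    cases l with
    | nil => simp [PySem.Chars.count.go]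
    | cons x t =>
      by_cases hx : x = '/'
      · subst hx
        simp only [PySem.Chars.count.go, List.isPrefixOf]
        rw [if_pos (by simp)]
        rw [ih]
        · simp; omega
        · simpa using Nat.le_of_succ_le_succ h
      · simp only [PySem.Chars.count.go]
        rw [if_neg, ih]
        · simp [hx]
        · simpa using Nat.le_of_succ_le_succ h
        · simp [List.isPrefixOf]; intro hh; exact hx hh.symm

lemma pvCount_single (l : List Char) : PySem.Chars.count l ['/'] = l.count '/' := by
  simp [PySem.Chars.count, pvCount_go_single l.length l 0 le_rfl]

lemma pvSplit_no_slash {l : List Char} (h : '/' ∉ l) : ∀ (pre : List Char),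
    pvSplit pre l = [pre ++ l] := by
  induction l with
  | nil => intro pre; simp [pvSplit]
  | cons x t ih =>
    intro pre
    have hx : x ≠ '/' := fun hh => h (hh ▸ List.mem_cons_self ..)
    rw [pvSplit, if_neg hx, ih (fun hh => h (List.mem_cons_of_mem _ hh))]
    simp

lemma pvSplit_append {a : List Char} (h : '/' ∉ a) : ∀ (pre b : List Char),
    pvSplit pre (a ++ '/' :: b) = (pre ++ a) :: pvSplit [] b := by
  induction a with
  | nil => intro pre b; simp [pvSplit]
  | cons x t ih =>
    intro pre b
    have hx : x ≠ '/' := fun hh => h (hh ▸ List.mem_cons_self ..)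
    rw [List.cons_append, pvSplit, if_neg hx, ih (fun hh => h (List.mem_cons_of_mem _ hh))]
    simp

-- a '/'-free prefix of u ++ '/' :: v is a prefix of u
lemma pvPrefix_no_cross {m u v : List Char} (hm : '/' ∉ m)
    (h : m <+: u ++ '/' :: v) : m <+: u := by
  by_cases hl : m.length ≤ u.length
  · obtain ⟨r, hr⟩ := h
    refine ⟨(u.drop m.length), ?_⟩
    apply List.append_cancel_right (bs := '/' :: v)
    rw [List.append_assoc, ← List.drop_append_of_le_length hl, ← hr]
    simp
  · exfalso
    apply hm
    have hg := h.getElem (i := u.length) (by omega)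
    rw [List.getElem_append_right (le_refl u.length)] at hg
    simp at hg
    exact hg ▸ List.getElem_mem _

lemma pvGoA_hit {part : List Char} (h : ∃ m, pvIsMarker m ∧ PySem.Chars.isIn m part = true)
    (rest : List (List Char)) (idx : Nat) : pvGoA (part :: rest) idx = some idx := by
  rw [pvGoA]
  obtain ⟨m, hm, hin⟩ := h
  rcases hm with h | h | h | h <;> subst h <;> simp [hin]

lemma pvGoA_miss {part : List Char} (h : ∀ m, pvIsMarker m → PySem.Chars.isIn m part = false)
    (rest : List (List Char)) (idx : Nat) : pvGoA (part :: rest) idx = pvGoA rest (idx + 1) := by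
  rw [pvGoA]
  rw [h pvM1 (Or.inl rfl), h pvM2 (Or.inr (Or.inl rfl)), h pvM3 (Or.inr (Or.inr (Or.inl rfl))),
    h pvM4 (Or.inr (Or.inr (Or.inr rfl)))]
  simp

-- MAIN: if the earliest marker occurrence in cs starts at p0, A's scan over the '/'-segments
-- returns idx + (number of '/' before p0)
lemma pvMain : ∀ (n : Nat), ∀ (cs : List Char), cs.length ≤ n → ∀ (p0 idx : Nat),
    (∃ m, pvIsMarker m ∧ m <+: cs.drop p0) →
    (∀ q, q < p0 → ∀ m, pvIsMarker m → ¬ m <+: cs.drop q) →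
    pvGoA (pvSplit [] cs) idx = some (idx + (cs.take p0).count '/') := by
  intro n
  induction n with
  | zero =>
    intro cs hlen p0 idx hex hmin
    have hcs : cs = [] := List.eq_nil_of_length_eq_zero (by omega)
    subst hcs
    obtain ⟨m, hm, hpre⟩ := hex
    exact absurd (List.prefix_nil.mp (by simpa using hpre)) (pvMarker_ne_nil hm)
  | succ n ih =>
    intro cs hlen p0 idx hex hmin
    by_cases hsl : '/' ∈ cs
    · -- cs = a ++ '/' :: b with '/' ∉ a
      set a := cs.takeWhile (fun x => x != '/') with ha
      set d := cs.dropWhile (fun x => x != '/') with hd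
      have hdne : d ≠ [] := by
        intro hnil
        have := List.dropWhile_eq_nil_iff.mp (hd ▸ hnil) '/' hsl
        simp at this
      obtain ⟨x, t, hdxt⟩ := List.exists_cons_of_ne_nil hdne
      have hx : x = '/' := by
        have h1 := List.head_dropWhile_not (fun x => x != '/') (hd ▸ hdne)
        simp only [show List.dropWhile (fun x => x != '/') cs = x :: t from hdxt,
          List.head_cons] at h1
        simpa using h1
      set b := t with hb
      have hcs : cs = a ++ '/' :: b := by
        conv_lhs => rw [← List.takeWhile_append_dropWhile (p := fun x => x != '/') (l := cs)]
        rw [← ha, ← hd, hdxt, hx]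
      have hna : '/' ∉ a := by
        intro hmem
        have := List.mem_takeWhile_imp (ha ▸ hmem)
        simp at this
      have hblen : b.length ≤ n := by
        have : cs.length = a.length + 1 + b.length := by rw [hcs]; simp; omega
        omega
      by_cases hA : ∃ m, pvIsMarker m ∧ PySem.Chars.isIn m a = true
      · -- a marker occurs in the first segment: index 0, and no '/' before p0
        obtain ⟨m, hm, hin⟩ := hA
        obtain ⟨j, hj⟩ := (PySem.Chars.exists_prefix_drop_iff_isIn m a).mpr hin
        have hjlt : j < a.length := by
          rcases Nat.lt_or_ge j a.length with h | h
          · exact h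
          · exfalso
            rw [List.drop_eq_nil_of_le h] at hj
            exact pvMarker_ne_nil hm (List.prefix_nil.mp hj)
        have hjcs : m <+: cs.drop j := by
          rw [hcs, List.drop_append_of_le_length (by omega)]
          exact hj.trans (List.prefix_append _ _)
        have hp0j : p0 ≤ j := by
          by_contra hlt
          exact hmin j (by omega) m hm hjcs
        have hcount : (cs.take p0).count '/' = 0 := by
          rw [hcs, List.take_append_of_le_length (by omega)]
          exact List.count_eq_zero.mpr (fun hmem => hna (List.take_subset _ _ hmem))
        rw [hcs, pvSplit_append hna, List.nil_append, pvGoA_hit ⟨m, hm, hin⟩, ← hcs, hcount]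
        simp
      · -- no marker in the first segment: the earliest occurrence is in b, recurse
        push Not at hA
        have hAf : ∀ m, pvIsMarker m → PySem.Chars.isIn m a = false := by
          intro m hm
          cases hh : PySem.Chars.isIn m a
          · rfl
          · exact absurd hh (hA m hm)
        have hp0a : a.length + 1 ≤ p0 := by
          by_contra hle
          obtain ⟨m, hm, hpre⟩ := hex
          rw [hcs, List.drop_append_of_le_length (by omega)] at hpre
          have : m <+: a.drop p0 := pvPrefix_no_cross (pvMarker_no_slash hm) hpre
          have : PySem.Chars.isIn m a = true :=
            (PySem.Chars.exists_prefix_drop_iff_isIn m a).mp ⟨p0, this⟩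
          exact absurd this (hA m hm)
        set p0' := p0 - (a.length + 1) with hp0'
        have hdropeq : ∀ k : Nat, cs.drop (a.length + 1 + k) = b.drop k := by
          intro k
          rw [hcs, List.drop_append, List.drop_eq_nil_of_le (by omega), List.nil_append]
          have h2 : a.length + 1 + k - a.length = k + 1 := by omega
          rw [h2, List.drop_succ_cons]
        have hex' : ∃ m, pvIsMarker m ∧ m <+: b.drop p0' := by
          obtain ⟨m, hm, hpre⟩ := hex
          refine ⟨m, hm, ?_⟩
          rw [← hdropeq]
          have : a.length + 1 + p0' = p0 := by omega
          rw [this]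
          exact hpre
        have hmin' : ∀ q, q < p0' → ∀ m, pvIsMarker m → ¬ m <+: b.drop q := by
          intro q hq m hm hpre
          exact hmin (a.length + 1 + q) (by omega) m hm (by rw [hdropeq]; exact hpre)
        have hIH := ih b hblen p0' (idx + 1) hex' hmin'
        rw [hcs, pvSplit_append hna, List.nil_append, pvGoA_miss hAf, hIH]
        have htake : (a ++ '/' :: b).take p0 = a ++ '/' :: b.take p0' := by
          rw [List.take_append]
          congr 1
          · rw [List.take_of_length_le (by omega)]
          · have : p0 - a.length = p0' + 1 := by omega
            rw [this]
            simp
        rw [htake]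
        congr 1
        simp [List.count_eq_zero.mpr hna]
        omega
    · -- no '/': one segment, and the '/'-count before p0 is 0
      rw [pvSplit_no_slash hsl, List.nil_append]
      obtain ⟨m, hm, hpre⟩ := hex
      have hin : PySem.Chars.isIn m cs = true :=
        (PySem.Chars.exists_prefix_drop_iff_isIn m cs).mp ⟨p0, hpre⟩
      rw [pvGoA_hit ⟨m, hm, hin⟩]
      have : (cs.take p0).count '/' = 0 :=
        List.count_eq_zero.mpr (fun hmem => hsl (List.take_subset _ _ hmem))
      rw [this]
      simp

-- assembly: under Pre_, B's min-of-finds position is the earliest marker occurrence, and A's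
-- segment scan returns the number of '/' before it
lemma pvFinal (path : String)
    (hpre : (PySem.Str.isIn "{version}" path || PySem.Str.isIn "{fragment}" path ||
     PySem.Str.isIn "(?P<version_" path || PySem.Str.isIn "(?P<fragment>" path) = true) :
    get_dynamic_path_index_py path = get_dynamic_path_index_py_alt path := by
  have hex0 : ∃ m, pvIsMarker m ∧ PySem.Chars.isIn m path.toList = true := by
    simp only [PySem.Str.isIn_eq, Bool.or_eq_true] at hpre
    rcases hpre with ((h | h) | h) | h
    exacts [⟨pvM1, Or.inl rfl, h⟩, ⟨pvM2, Or.inr (Or.inl rfl), h⟩,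
      ⟨pvM3, Or.inr (Or.inr (Or.inl rfl)), h⟩, ⟨pvM4, Or.inr (Or.inr (Or.inr rfl)), h⟩]
  obtain ⟨m0, hm0, hin0⟩ := hex0
  have hmemlist : ∀ m : List Char, pvIsMarker m → m ∈ [pvM1, pvM2, pvM3, pvM4] := by
    intro m hm; rcases hm with h | h | h | h <;> subst h <;> simp
  have hfmem : ∀ m : List Char, pvIsMarker m → PySem.Chars.isIn m path.toList = true →
      PySem.Chars.find path.toList m ∈
        ([pvM1, pvM2, pvM3, pvM4].map (fun m => PySem.Chars.find path.toList m)).filter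
          (fun p => p ≠ -1) := by
    intro m hm hin
    refine List.mem_filter.mpr ⟨List.mem_map.mpr ⟨m, hmemlist m hm, rfl⟩, ?_⟩
    have : PySem.Chars.find path.toList m ≠ -1 := by
      rw [Ne, PySem.Chars.find_eq_neg_one_iff]
      exact fun hc => hc ((PySem.Chars.isIn_iff_infix m path.toList).mp hin)
    simpa using this
  obtain ⟨p, hp⟩ : ∃ p, PySem.List.min?
      (([pvM1, pvM2, pvM3, pvM4].map (fun m => PySem.Chars.find path.toList m)).filter
        (fun p => p ≠ -1)) id = some p := by
    cases h : PySem.List.min?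
        (([pvM1, pvM2, pvM3, pvM4].map (fun m => PySem.Chars.find path.toList m)).filter
          (fun p => p ≠ -1)) id with
    | none =>
      exact absurd ((PySem.List.min?_eq_none_iff _ _).mp h)
        (List.ne_nil_of_mem (hfmem m0 hm0 hin0))
    | some p => exact ⟨p, rfl⟩
  have hpmem := PySem.List.min?_mem hp
  obtain ⟨mk, hmk, hpk⟩ : ∃ mk, pvIsMarker mk ∧ p = PySem.Chars.find path.toList mk := by
    obtain ⟨m, hm, hval⟩ := List.mem_map.mp (List.mem_filter.mp hpmem).1
    refine ⟨m, ?_, hval.symm⟩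
    simpa [pvIsMarker] using hm
  have hpne : p ≠ -1 := by simpa using (List.mem_filter.mp hpmem).2
  have hp0 : 0 ≤ p := by
    have := PySem.Chars.neg_one_le_find path.toList mk
    omega
  have hspec := PySem.Chars.find_spec (s := path.toList) (sub := mk) (by rw [← hpk]; exact hp0)
  have hex : ∃ m, pvIsMarker m ∧ m <+: path.toList.drop p.toNat :=
    ⟨mk, hmk, by rw [hpk]; exact hspec.1⟩
  have hmin : ∀ q, q < p.toNat → ∀ m, pvIsMarker m → ¬ m <+: path.toList.drop q := by
    intro q hq m hm hpre'
    have hinm : PySem.Chars.isIn m path.toList = true :=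
      (PySem.Chars.exists_prefix_drop_iff_isIn m path.toList).mp ⟨q, hpre'⟩
    have hle := PySem.List.min?_isMin hp _ (hfmem m hm hinm)
    simp only [id] at hle
    have hf0 : 0 ≤ PySem.Chars.find path.toList m := le_trans hp0 hle
    have hfspec := PySem.Chars.find_spec (s := path.toList) (sub := m) hf0
    have hge : (PySem.Chars.find path.toList m).toNat ≤ q := by
      by_contra hlt
      exact hfspec.2 q (by omega) hpre'
    have : p.toNat ≤ (PySem.Chars.find path.toList m).toNat := by omega
    omega
  have hA := pvMain path.toList.length path.toList le_rfl p.toNat 0 hex hmin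
  rw [get_dynamic_path_index_py, get_dynamic_path_index_py_alt]
  simp only [pvSplitOn_eq, hA, hp]
  rw [PySem.Chars.slice_eq_listSlice, PySem.List.slice_to _ hp0, pvCount_single]
  simp

-- ===== VERDICT (by name: the statement is the Claim_ definition above) =====
theorem get_dynamic_path_index_py_spec : Claim_equal_get_dynamic_path_index_py := by
  intro path _ hpre
  exact pvFinal path hpre
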